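-- pv_equiv track=rewrite | github.com/JohannesVoigt/aof-2024 | aoc_04.py | add_matrix_frame
-- ===== SOURCE A (Python) =====
-- from typing import Any
--
-- def add_matrix_frame(
--     mat: list[list[Any]],
--     framewidth: int,
--     token: str | int | float = "*",
-- ):
--     """
--     Add a frame around a matrix, i.e., a list of lists with the thickness \
--         'framewidth' and filled with 'frame_token'.
--     """
--     hframe = [len(mat[0]) * [token] for _ in range(framewidth)]
--     vframe = framewidth * [token]
--     mat = hframe + mat + hframe
--     mat_ = []
--     for row in mat:
--         mat_.append(vframe + row + vframe)
--     return mat_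
-- ===== SOURCE B (Python) =====
-- def add_matrix_frame(mat, framewidth, token="*"):
--     # Coordinate-wise generation: every output cell is computed from its (r, c)
--     # position; no list concatenation, no prebuilt frame pieces.
--     f = framewidth if framewidth > 0 else 0
--     rows = len(mat)
--     out = []
--     for r in range(rows + 2 * f):
--         if f <= r < f + rows:
--             row = mat[r - f]
--             out.append([token if c < f or c >= f + len(row) else row[c - f]
--                         for c in range(len(row) + 2 * f)])
--         else:
--             out.append([token for _ in range(len(mat[0]) + 2 * f)])
--     return out
-- ===== Notes on version B (the rewrite author's own statement) =====
-- stated objective: alternative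
-- what changed: B generates every output cell directly from its (row, column) coordinates with a per-cell frame test and index arithmetic (mat[r-f], row[c-f]), instead of A's construction that concatenates prebuilt frame lists (half-frames plus per-row side padding).
import Mathlib
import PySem

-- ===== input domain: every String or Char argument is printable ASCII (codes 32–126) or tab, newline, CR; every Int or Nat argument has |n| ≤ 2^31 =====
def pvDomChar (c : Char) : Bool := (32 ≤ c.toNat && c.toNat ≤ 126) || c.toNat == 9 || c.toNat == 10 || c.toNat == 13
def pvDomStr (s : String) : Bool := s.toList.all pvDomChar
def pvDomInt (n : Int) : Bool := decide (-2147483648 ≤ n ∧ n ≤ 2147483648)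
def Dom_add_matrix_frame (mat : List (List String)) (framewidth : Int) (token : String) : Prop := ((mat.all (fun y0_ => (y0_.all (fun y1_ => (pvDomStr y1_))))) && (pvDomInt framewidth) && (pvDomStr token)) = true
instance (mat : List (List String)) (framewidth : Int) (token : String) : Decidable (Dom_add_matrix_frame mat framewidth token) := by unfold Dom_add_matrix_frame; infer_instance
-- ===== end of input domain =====

-- B generates every output cell directly from its (row, column) coordinates (index arithmetic
-- with a per-cell frame test), instead of A's construction by concatenating prebuilt frame lists.

-- ===== PORT A =====
-- hframe = [len(mat[0]) * [token] for _ in range(framewidth)];  vframe = framewidth * [token]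
-- mat = hframe + mat + hframe;  then one loop appending vframe + row + vframe.
def add_matrix_frame (mat : List (List String)) (framewidth : Int) (token : String) : List (List String) :=
  let row0len := ((PySem.List.pyGet? mat 0).getD []).length   -- len(mat[0]); Pre_ excludes mat = [] with framewidth > 0 (IndexError)
  let hframe := (PySem.List.pyRange 0 framewidth 1).map (fun _ => List.replicate row0len token)
  let vframe := List.replicate framewidth.toNat token          -- n * [x] is [] for n < 0, as toNat clamps
  let mat2 := hframe ++ mat ++ hframe
  mat2.foldl (fun acc row => acc ++ [vframe ++ row ++ vframe]) []

-- ===== PORT B =====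
-- [token if c < f or c >= f + len(row) else row[c-f] for c in range(len(row) + 2*f)]
-- (row[c-f] is always in range when that branch is taken, so .getD "" is exact)
def bMidRow (row : List String) (f : Int) (token : String) : List String :=
  (PySem.List.pyRange 0 ((row.length : Int) + 2 * f) 1).map
    (fun c => if c < f ∨ f + (row.length : Int) ≤ c then token
              else (PySem.List.pyGet? row (c - f)).getD "")

-- [token for _ in range(len(mat[0]) + 2*f)]
def bFrameRow (mat : List (List String)) (f : Int) (token : String) : List String :=
  (PySem.List.pyRange 0 ((((PySem.List.pyGet? mat 0).getD []).length : Int) + 2 * f) 1).map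
    (fun _ => token)

-- f = framewidth if framewidth > 0 else 0; one loop over all output row indices r,
-- middle rows indexed as mat[r-f], frame rows generated cell-wise.
def add_matrix_frame_alt (mat : List (List String)) (framewidth : Int) (token : String) : List (List String) :=
  let f : Int := if 0 < framewidth then framewidth else 0
  let rows : Int := mat.length
  (PySem.List.pyRange 0 (rows + 2 * f) 1).foldl
    (fun out r => out ++ [if f ≤ r ∧ r < f + rows
        then bMidRow ((PySem.List.pyGet? mat (r - f)).getD []) f token
        else bFrameRow mat f token]) []

-- ===== PRECONDITION & SPEC =====
-- Pre_ excludes mat = [] with framewidth > 0, on which A (and B) raise IndexError at len(mat[0]).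
def Pre_add_matrix_frame (mat : List (List String)) (framewidth : Int) (token : String) : Prop := mat ≠ [] ∨ framewidth ≤ 0
instance (mat : List (List String)) (framewidth : Int) (token : String) : Decidable (Pre_add_matrix_frame mat framewidth token) := by unfold Pre_add_matrix_frame; infer_instance
def pvWitness_add_matrix_frame : List (List String) × Int × String := ([["a", "b"], ["c", "d"]], 2, "*")

def Spec_add_matrix_frame (mat : List (List String)) (framewidth : Int) (token : String) (out : List (List String)) : Prop := out = add_matrix_frame_alt mat framewidth token
instance (mat : List (List String)) (framewidth : Int) (token : String) (out : List (List String)) : Decidable (Spec_add_matrix_frame mat framewidth token out) := by unfold Spec_add_matrix_frame; infer_instance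

-- ===== CLAIM (what is proved, stated in full; the proofs are below) =====
def Claim_equal_add_matrix_frame : Prop := ∀ (mat : List (List String)) (framewidth : Int) (token : String), Dom_add_matrix_frame mat framewidth token → Pre_add_matrix_frame mat framewidth token → Spec_add_matrix_frame mat framewidth token (add_matrix_frame mat framewidth token)

-- ===== LEMMAS AND PROOFS =====

-- common closed form: frame of thickness n around mat
def framed (mat : List (List String)) (token : String) (n : Nat) : List (List String) :=
  List.replicate n (List.replicate ((mat.headD []).length + 2 * n) token)
    ++ mat.map (fun row => List.replicate n token ++ row ++ List.replicate n token)
    ++ List.replicate n (List.replicate ((mat.headD []).length + 2 * n) token)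

lemma head_get (mat : List (List String)) (h : mat ≠ []) :
    ((PySem.List.pyGet? mat 0).getD []).length = (mat.headD []).length := by
  cases mat with
  | nil => exact absurd rfl h
  | cons r rs => simp [PySem.List.pyGet?, PySem.List.pyIdx?]

-- B's cell-wise middle row is the padded row
lemma bMidRow_eq (row : List String) (fn : Nat) (token : String) :
    bMidRow row (fn : Int) token
      = List.replicate fn token ++ row ++ List.replicate fn token := by
  unfold bMidRow
  rw [PySem.List.pyRange_one]
  rw [List.map_map]
  apply List.ext_getElem
  · simp; omega
  · intro i h1 h2
    simp only [List.getElem_map, List.getElem_range, Function.comp]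
    have hi : i < row.length + 2 * fn := by simp at h1; omega
    by_cases hlt : i < fn
    · rw [if_pos (by left; omega)]
      rw [List.getElem_append_left (by simp; omega)]
      rw [List.getElem_append_left (by simp; omega), List.getElem_replicate]
    · by_cases hmid : i < fn + row.length
      · rw [if_neg (by omega)]
        have hc : (0 : Int) + (i : Int) - (fn : Int) = ((i - fn : Nat) : Int) := by omega
        rw [hc, PySem.List.pyGet?_natCast]
        have hlen : i - fn < row.length := by omega
        rw [List.getElem?_eq_getElem hlen]
        rw [List.getElem_append_left (by simp; omega)]
        rw [List.getElem_append_right (by simp; omega)]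
        simp
      · rw [if_pos (by right; omega)]
        rw [List.getElem_append_right (by simp; omega), List.getElem_replicate]

-- B's cell-wise frame row is a replicate
lemma bFrameRow_eq (mat : List (List String)) (fn : Nat) (token : String) (h : mat ≠ []) :
    bFrameRow mat (fn : Int) token
      = List.replicate ((mat.headD []).length + 2 * fn) token := by
  unfold bFrameRow
  rw [List.map_const', PySem.List.length_pyRange_one, head_get mat h]
  congr 1
  try omega

lemma flatten_map_singleton {α : Type} (l : List α) : (l.map (fun x => [x])).flatten = l := by
  induction l with
  | nil => rfl
  | cons a t ih => simp [ih]

-- B's whole loop equals the closed form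
lemma alt_eq_framed (mat : List (List String)) (fn : Nat) (token : String)
    (h : mat ≠ [] ∨ fn = 0) :
    (PySem.List.pyRange 0 ((mat.length : Int) + 2 * (fn : Int)) 1).foldl
      (fun out r => out ++ [if (fn : Int) ≤ r ∧ r < (fn : Int) + (mat.length : Int)
          then bMidRow ((PySem.List.pyGet? mat (r - (fn : Int))).getD []) (fn : Int) token
          else bFrameRow mat (fn : Int) token]) []
      = framed mat token fn := by
  rw [PySem.List.foldl_append_singleton_eq_map, List.nil_append]
  rw [PySem.List.pyRange_one, List.map_map]
  apply List.ext_getElem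
  · simp [framed]; omega
  · intro i h1 h2
    simp only [List.getElem_map, List.getElem_range, Function.comp]
    have hi : i < mat.length + 2 * fn := by simp at h1; omega
    by_cases hlt : i < fn
    · have hm : mat ≠ [] := by
        rcases h with h | h
        · exact h
        · exact absurd hlt (by omega)
      rw [if_neg (by omega), bFrameRow_eq mat fn token hm]
      simp only [framed]
      rw [List.getElem_append_left (by simp; omega)]
      rw [List.getElem_append_left (by simp; omega), List.getElem_replicate]
    · by_cases hmid : i < fn + mat.length
      · rw [if_pos (by constructor <;> omega)]
        have hc : (0 : Int) + (i : Int) - (fn : Int) = ((i - fn : Nat) : Int) := by omega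
        rw [hc, PySem.List.pyGet?_natCast]
        have hlen : i - fn < mat.length := by omega
        rw [List.getElem?_eq_getElem hlen]
        simp only [Option.getD_some]
        rw [bMidRow_eq]
        simp only [framed]
        rw [List.getElem_append_left (by simp; omega)]
        rw [List.getElem_append_right (by simp; omega)]
        simp
      · have hm : mat ≠ [] := by
          rcases h with h | h
          · exact h
          · exact absurd hi (by omega)
        rw [if_neg (by omega), bFrameRow_eq mat fn token hm]
        simp only [framed]
        rw [List.getElem_append_right (by simp; omega), List.getElem_replicate]

-- ===== VERDICT (by name: the statement is the Claim_ definition above) =====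
theorem add_matrix_frame_spec : Claim_equal_add_matrix_frame := by
  intro mat framewidth token _ hpre
  unfold Spec_add_matrix_frame add_matrix_frame add_matrix_frame_alt
  by_cases hpos : 0 < framewidth
  · -- positive framewidth: Pre_ gives mat ≠ []
    have hm : mat ≠ [] := by
      rcases hpre with h | h
      · exact h
      · omega
    simp only [if_pos hpos]
    have hfw : framewidth = ((framewidth.toNat : Nat) : Int) :=
      (Int.toNat_of_nonneg (le_of_lt hpos)).symm
    rw [hfw, alt_eq_framed mat framewidth.toNat token (Or.inl hm)]
    -- A's side: distribute the widening pass and collapse the replicates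
    rw [PySem.List.foldl_append_singleton_eq_map, List.nil_append]
    have hhf : (PySem.List.pyRange 0 ((framewidth.toNat : Nat) : Int) 1).map
          (fun _ => List.replicate ((PySem.List.pyGet? mat 0).getD []).length token)
        = List.replicate framewidth.toNat (List.replicate (mat.headD []).length token) := by
      rw [List.map_const', PySem.List.length_pyRange_one, head_get mat hm]
      congr 1
      try omega
    rw [hhf]
    simp only [List.map_append, List.map_replicate, Int.toNat_natCast]
    have hrow : List.replicate framewidth.toNat token
          ++ List.replicate (mat.headD []).length token
          ++ List.replicate framewidth.toNat token
        = List.replicate ((mat.headD []).length + 2 * framewidth.toNat) token := by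
      rw [← List.replicate_add, ← List.replicate_add]
      congr 1
      omega
    rw [hrow]
    unfold framed
    rfl
  · -- framewidth ≤ 0: no frame on either side; A copies rows, B regenerates them cell-wise
    simp only [if_neg hpos]
    have halt := alt_eq_framed mat 0 token (Or.inr rfl)
    simp only [Nat.cast_zero] at halt
    rw [halt]
    have hr : PySem.List.pyRange 0 framewidth 1 = [] :=
      PySem.List.pyRange_one_eq_nil (by omega)
    have ht : framewidth.toNat = 0 := Int.toNat_of_nonpos (by omega)
    simp [hr, ht, framed]
    exact flatten_map_singleton mat
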